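-- pv_equiv track=rewrite | github.com/awaistahseen009/AI-Resume-Taylor | services/pdf_generator.py | _extract_latex_content
-- ===== SOURCE A (Python) =====
-- def _extract_latex_content(line: str, command: str) -> str:
--     """Extract content from LaTeX command"""
--     start = line.find(command)
--     if start == -1:
--         return ""
--
--     start += len(command)
--     brace_count = 0
--     content = ""
--
--     for char in line[start:]:
--         if char == '{':
--             brace_count += 1
--         elif char == '}':
--             if brace_count == 0:
--                 break
--             brace_count -= 1
--         else:
--             content += char
--
--     return content.strip()
-- ===== SOURCE B (Python) =====
-- def _extract_latex_content(line: str, command: str) -> str: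
--     """Extract content from LaTeX command (find boundary first, then clean)."""
--     start = line.find(command)
--     if start == -1:
--         return ""
--     tail = line[start + len(command):]
--     # boundary: the first '}' preceded by equally many '{' and '}'
--     end = len(tail)
--     for j, ch in enumerate(tail):
--         if ch == '}' and tail[:j].count('{') == tail[:j].count('}'):
--             end = j
--             break
--     return ''.join(c for c in tail[:end] if c not in '{}').strip()
-- ===== Notes on version B (the rewrite author's own statement) =====
-- stated objective: alternative
-- what changed: B separates boundary-finding from cleaning: it first locates the first '}' whose prefix has balanced '{'/'}' counts (enumerate + prefix counts) and then builds the result by filtering braces out of that span and stripping, instead of A's single loop that fuses a running brace_count with character-by-character accumulation.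
import Mathlib
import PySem

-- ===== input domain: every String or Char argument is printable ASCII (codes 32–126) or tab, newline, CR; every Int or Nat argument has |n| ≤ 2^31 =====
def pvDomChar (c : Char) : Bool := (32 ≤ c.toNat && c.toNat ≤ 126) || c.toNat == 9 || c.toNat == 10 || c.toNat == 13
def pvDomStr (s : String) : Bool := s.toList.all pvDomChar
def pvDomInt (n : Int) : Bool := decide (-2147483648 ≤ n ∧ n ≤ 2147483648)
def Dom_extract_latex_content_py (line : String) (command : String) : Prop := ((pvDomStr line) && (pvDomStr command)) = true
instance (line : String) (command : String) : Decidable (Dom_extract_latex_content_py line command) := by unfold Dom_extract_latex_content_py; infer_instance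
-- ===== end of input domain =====

-- B finds the boundary (first '}' with balanced brace counts in its prefix) and only then
-- removes braces and strips, instead of A's fused depth-counting accumulator loop (objective: alternative decomposition).

-- ===== PORT A =====
-- the for-loop of A: state (brace_count, content); brace_count is only decremented when ≠ 0
-- (Python breaks at 0 first), so Nat is exact here
def pvALoop : List Char → Nat → List Char → List Char
  | [], _, content => content
  | c :: rest, bc, content =>
    if c = '{' then pvALoop rest (bc + 1) content
    else if c = '}' then
      (if bc = 0 then content else pvALoop rest (bc - 1) content)
    else pvALoop rest bc (content ++ [c])

def extract_latex_content_py (line : String) (command : String) : String :=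
  let start := PySem.Str.find line command
  if start = -1 then ""
  else
    let start := start + (PySem.Str.len command : Int)
    let tail := PySem.List.slice line.toList (some start) none
    String.ofList (PySem.Chars.strip (pvALoop tail 0 []))

-- ===== PORT B =====
-- the for j, ch in enumerate(tail) loop of B: returns the first j with tail[j] = '}' and
-- tail[:j].count('{') == tail[:j].count('}'), else len(tail)
def pvBGo (tail : List Char) : List Char → Nat → Nat
  | [], _ => tail.length
  | c :: rest, j =>
    if c = '}' ∧ PySem.Chars.count (PySem.List.slice tail none (some (j : Int))) ['{']
                 = PySem.Chars.count (PySem.List.slice tail none (some (j : Int))) ['}']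
    then j
    else pvBGo tail rest (j + 1)

def extract_latex_content_py_alt (line : String) (command : String) : String :=
  let start := PySem.Str.find line command
  if start = -1 then ""
  else
    let tail := PySem.List.slice line.toList (some (start + (PySem.Str.len command : Int))) none
    let e := pvBGo tail tail 0
    -- `c not in '{}'` for a single char c is exactly c ≠ '{' ∧ c ≠ '}'
    String.ofList (PySem.Chars.strip
      ((PySem.List.slice tail none (some (e : Int))).filter (fun c => !(c == '{' || c == '}'))))

-- ===== PRECONDITION & SPEC =====
def Spec_extract_latex_content_py (line : String) (command : String) (out : String) : Prop := out = extract_latex_content_py_alt line command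
instance (line : String) (command : String) (out : String) : Decidable (Spec_extract_latex_content_py line command out) := by unfold Spec_extract_latex_content_py; infer_instance

-- ===== CLAIM (what is proved, stated in full; the proofs are below) =====
def Claim_equal_extract_latex_content_py : Prop := ∀ (line : String) (command : String), Dom_extract_latex_content_py line command → Spec_extract_latex_content_py line command (extract_latex_content_py line command)

-- ===== LEMMAS AND PROOFS =====

-- the break index of A's loop, as a function of the initial brace count
def pvIdx : List Char → Nat → Nat
  | [], _ => 0
  | c :: rest, bc =>
    if c = '{' then pvIdx rest (bc + 1) + 1
    else if c = '}' then (if bc = 0 then 0 else pvIdx rest (bc - 1) + 1)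
    else pvIdx rest bc + 1

lemma pvALoop_eq (s : List Char) : ∀ (bc : Nat) (content : List Char),
    pvALoop s bc content
      = content ++ (s.take (pvIdx s bc)).filter (fun c => !(c == '{' || c == '}')) := by
  induction s with
  | nil => intro bc content; simp [pvALoop, pvIdx]
  | cons c rest ih =>
    intro bc content
    by_cases h1 : c = '{'
    · subst h1; simp [pvALoop, pvIdx, ih]
    · by_cases h2 : c = '}'
      · subst h2
        by_cases h0 : bc = 0
        · simp [pvALoop, pvIdx, h0]
        · simp [pvALoop, pvIdx, h0, ih]
      · simp [pvALoop, pvIdx, h1, h2, ih]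

-- s.count(c) for a one-character needle is the character count
lemma pvCountGo_single (c : Char) : ∀ (fuel : Nat) (l : List Char) (acc : Nat),
    l.length ≤ fuel → PySem.Chars.count.go [c] fuel l acc = acc + l.count c := by
  intro fuel
  induction fuel with
  | zero =>
    intro l acc h
    have : l = [] := List.eq_nil_of_length_eq_zero (Nat.le_zero.mp h)
    subst this; simp [PySem.Chars.count.go]
  | succ n ih =>
    intro l acc h
    cases l with
    | nil => simp [PySem.Chars.count.go]
    | cons a t =>
      simp only [PySem.Chars.count.go, List.isPrefixOf, List.length_cons] at *
      by_cases hac : c = a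
      · subst hac
        simp only [beq_self_eq_true, Bool.true_and, if_pos]
        show PySem.Chars.count.go [c] n t (acc + 1) = _
        rw [ih t (acc + 1) (by omega), List.count_cons]
        simp; omega
      · have : (c == a) = false := beq_eq_false_iff_ne.mpr hac
        simp only [this, Bool.false_and, Bool.false_eq_true, if_false]
        rw [ih t acc (by omega), List.count_cons]
        have : (a == c) = false := beq_eq_false_iff_ne.mpr (fun h' => hac h'.symm)
        simp [this]

lemma pvCount_single (l : List Char) (c : Char) :
    PySem.Chars.count l [c] = l.count c := by
  simp [PySem.Chars.count, pvCountGo_single c l.length l 0 le_rfl]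

-- B's boundary loop agrees with A's break index
lemma pvBGo_eq (rest : List Char) : ∀ (pre : List Char) (bc : Nat),
    pre.count '{' = pre.count '}' + bc →
    pvBGo (pre ++ rest) rest pre.length = pre.length + pvIdx rest bc := by
  induction rest with
  | nil => intro pre bc _; simp [pvBGo, pvIdx]
  | cons c rest ih =>
    intro pre bc hcnt
    have hslice : PySem.List.slice (pre ++ c :: rest) none (some ((pre.length : Nat) : Int))
        = pre := by
      rw [PySem.List.slice_to_natCast]; exact List.take_left
    simp only [pvBGo, hslice, pvCount_single]
    by_cases h2 : c = '}'
    · subst h2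
      by_cases h0 : bc = 0
      · rw [if_pos ⟨rfl, by omega⟩]
        simp [pvIdx, h0]
      · rw [if_neg (by rintro ⟨-, h⟩; omega)]
        have h' : (pre ++ ['}']).count '{' = (pre ++ ['}']).count '}' + (bc - 1) := by
          simp [List.count_append]; omega
        have := ih (pre ++ ['}']) (bc - 1) h'
        simp only [List.append_assoc, List.singleton_append, List.length_append,
          List.length_singleton] at this
        rw [this]
        simp [pvIdx, h0]; omega
    · rw [if_neg (by rintro ⟨h, -⟩; exact h2 h)]
      by_cases h1 : c = '{'
      · subst h1
        have h' : (pre ++ ['{']).count '{' = (pre ++ ['{']).count '}' + (bc + 1) := by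
          simp [List.count_append]; omega
        have := ih (pre ++ ['{']) (bc + 1) h'
        simp only [List.append_assoc, List.singleton_append, List.length_append,
          List.length_singleton] at this
        rw [this]
        simp [pvIdx]; omega
      · have h' : (pre ++ [c]).count '{' = (pre ++ [c]).count '}' + bc := by
          simp [List.count_append, h1, h2]; omega
        have := ih (pre ++ [c]) bc h'
        simp only [List.append_assoc, List.singleton_append, List.length_append,
          List.length_singleton] at this
        rw [this]
        simp [pvIdx, h1, h2]; omega

lemma pvMain (t : List Char) :
    PySem.Chars.strip (pvALoop t 0 []) =
    PySem.Chars.strip ((PySem.List.slice t none (some ((pvBGo t t 0 : Nat) : Int))).filter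
      (fun c => !(c == '{' || c == '}'))) := by
  have hb : pvBGo t t 0 = pvIdx t 0 := by simpa using pvBGo_eq t [] 0 (by simp)
  rw [pvALoop_eq, hb, PySem.List.slice_to_natCast]
  simp

-- ===== VERDICT (by name: the statement is the Claim_ definition above) =====
theorem extract_latex_content_py_spec : Claim_equal_extract_latex_content_py := by
  intro line command _
  unfold Spec_extract_latex_content_py extract_latex_content_py extract_latex_content_py_alt
  by_cases h : PySem.Chars.find line.toList command.toList = -1
  · simp [h]
  · simp only [PySem.Str.find_eq, PySem.Str.len_eq, if_neg h]
    exact congrArg String.ofList (pvMain _)
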